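-- pv_equiv track=rewrite | github.com/Jungdomo/PCT | 1/133502/문정민.py | solution
-- ===== SOURCE A (Python) =====
-- def solution(ingredient):
--
--     i = 0
--     rst = 0
--
--     while len(ingredient)-2 >= i:
--         if ingredient[i:i+4] == [1,2,3,1]:
--             del (ingredient[i:i+4])
--             i = i - 3
--             rst += 1
--         else:
--             i += 1
--
--     return rst
-- ===== SOURCE B (Python) =====
-- def solution(ingredient):
--     stack = []
--     count = 0
--     for x in ingredient:
--         stack.append(x)
--         if stack[-4:] == [1, 2, 3, 1]:
--             del stack[-4:]
--             count += 1
--     return count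
-- ===== Notes on version B (the rewrite author's own statement) =====
-- stated objective: faster
-- what changed: Replaced A's index-rewinding scan with repeated O(n) slice deletions by a single-pass stack machine that pushes each element and pops+counts when the top four equal [1,2,3,1].
import Mathlib
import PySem

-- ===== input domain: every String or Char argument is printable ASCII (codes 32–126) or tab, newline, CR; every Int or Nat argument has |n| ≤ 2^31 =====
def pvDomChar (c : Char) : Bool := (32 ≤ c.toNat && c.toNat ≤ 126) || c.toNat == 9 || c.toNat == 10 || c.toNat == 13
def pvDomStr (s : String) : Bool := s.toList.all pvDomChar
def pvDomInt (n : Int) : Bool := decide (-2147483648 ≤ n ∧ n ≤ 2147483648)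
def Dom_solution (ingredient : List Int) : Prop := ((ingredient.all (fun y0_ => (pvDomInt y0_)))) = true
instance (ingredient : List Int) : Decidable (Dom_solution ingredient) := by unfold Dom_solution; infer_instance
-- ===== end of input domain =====

-- B replaces A's index-rewinding scan with repeated slice deletions by a one-pass stack machine
-- (push each element, pop + count when the top four are [1,2,3,1]); equivalence is about the
-- RETURN value only — the Python A deletes matched slices from its argument list, B does not mutate it.

-- ===== PORT A =====
-- 'del ingredient[i:i+4]' leaves ingredient[:i] ++ ingredient[i+4:], ported exactly with PySem slices.
-- The while loop, ported as structural recursion on a fuel that provably dominates the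
-- loop's step count (the measure (len(ingredient) - i) decreases by exactly 1 per iteration).
def solutionAux : Nat → List Int → Int → Int → Int
  | 0, _, _, rst => rst
  | fuel + 1, xs, i, rst =>
    if (xs.length : Int) - 2 ≥ i then
      if PySem.List.slice xs (some i) (some (i + 4)) = [1, 2, 3, 1] then
        solutionAux fuel (PySem.List.slice xs none (some i) ++ PySem.List.slice xs (some (i + 4)) none)
          (i - 3) (rst + 1)
      else
        solutionAux fuel xs (i + 1) rst
    else
      rst

def solution (ingredient : List Int) : Int := solutionAux (ingredient.length + 1) ingredient 0 0

-- ===== PORT B =====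
def stepB (s : List Int × Int) (x : Int) : List Int × Int :=
  let st := s.1 ++ [x]
  if PySem.List.slice st (some (-4)) none = [1, 2, 3, 1] then
    (PySem.List.slice st none (some (-4)), s.2 + 1)
  else
    (st, s.2)

def solution_alt (ingredient : List Int) : Int :=
  (ingredient.foldl stepB ([], 0)).2

-- ===== PRECONDITION & SPEC =====
def Spec_solution (ingredient : List Int) (out : Int) : Prop := out = solution_alt ingredient
instance (ingredient : List Int) (out : Int) : Decidable (Spec_solution ingredient out) := by unfold Spec_solution; infer_instance

-- ===== CLAIM (what is proved, stated in full; the proofs are below) =====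
def Claim_equal_solution : Prop := ∀ (ingredient : List Int), Dom_solution ingredient → Spec_solution ingredient (solution ingredient)

-- ===== LEMMAS AND PROOFS =====

-- Length of the deleted-slice remainder (used by the equivalence proof).
theorem pvLen_slice_to (xs : List Int) (i : Int) :
    (PySem.List.slice xs none (some i)).length = PySem.List.clampIdx xs.length i := by
  rw [← PySem.List.slice_zero_start, PySem.List.length_slice]
  have h0 : PySem.List.clampIdx xs.length 0 = 0 := by
    simpa using PySem.List.clampIdx_natCast xs.length 0
  omega

theorem pvDel_length (xs : List Int) (i : Int)
    (h : PySem.List.slice xs (some i) (some (i + 4)) = [1, 2, 3, 1]) :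
    (PySem.List.slice xs none (some i) ++ PySem.List.slice xs (some (i + 4)) none).length
      = xs.length - 4 ∧ 4 ≤ xs.length := by
  have hlen : (PySem.List.slice xs (some i) (some (i + 4))).length = 4 := by rw [h]; rfl
  rw [PySem.List.length_slice] at hlen
  have h1 := PySem.List.clampIdx_le xs.length i
  have h2 := PySem.List.clampIdx_le xs.length (i + 4)
  constructor
  · rw [List.length_append, pvLen_slice_to, PySem.List.slice_some_none, List.length_drop]
    omega
  · omega

-- B's stack machine with the stack stored top-first (reversed); used only in the proofs.
def runB : List Int → List Int → Int → List Int × Int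
  | [], r, c => (r, c)
  | x :: v, r, c =>
    if (x :: r).take 4 = [1, 3, 2, 1] then runB v ((x :: r).drop 4) (c + 1)
    else runB v (x :: r) c

theorem runB_nil (r : List Int) (c : Int) : runB [] r c = (r, c) := rfl

theorem runB_cons (x : Int) (v r : List Int) (c : Int) :
    runB (x :: v) r c =
      if (x :: r).take 4 = [1, 3, 2, 1] then runB v ((x :: r).drop 4) (c + 1)
      else runB v (x :: r) c := rfl

theorem take4_eq (l : List Int) (a b c d : Int) :
    l.take 4 = [a, b, c, d] ↔ l[0]? = some a ∧ l[1]? = some b ∧ l[2]? = some c ∧ l[3]? = some d := by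
  rcases l with _ | ⟨x, _ | ⟨y, _ | ⟨z, _ | ⟨w, t⟩⟩⟩⟩ <;> simp

-- one step of B's fold, rephrased on the reversed stack
theorem stepB_eq (u : List Int) (c : Int) (x : Int) :
    stepB (u, c) x =
      if (x :: u.reverse).take 4 = [1, 3, 2, 1] then (((x :: u.reverse).drop 4).reverse, c + 1)
      else (u ++ [x], c) := by
  have hrev : (u ++ [x]).reverse = x :: u.reverse := by simp
  show (if PySem.List.slice (u ++ [x]) (some (-4)) none = [1, 2, 3, 1] then
      (PySem.List.slice (u ++ [x]) none (some (-4)), c + 1) else (u ++ [x], c)) = _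
  rw [PySem.List.slice_from_neg_ofNat (u ++ [x]) 4 (by norm_num),
      PySem.List.slice_to_neg_ofNat (u ++ [x]) 4 (by norm_num)]
  have hc : ((u ++ [x]).drop ((u ++ [x]).length - 4) = [1, 2, 3, 1]) ↔
      ((x :: u.reverse).take 4 = [1, 3, 2, 1]) := by
    rw [← hrev, List.take_reverse]
    constructor
    · intro h; rw [h]; rfl
    · intro h
      have := congrArg List.reverse h
      simpa using this
  have hv : ((x :: u.reverse).drop 4).reverse = (u ++ [x]).take ((u ++ [x]).length - 4) := by
    rw [← hrev, List.drop_reverse]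
    simp
  by_cases h : (u ++ [x]).drop ((u ++ [x]).length - 4) = [1, 2, 3, 1]
  · rw [if_pos h, if_pos (hc.mp h), hv]
  · rw [if_neg h, if_neg (fun hh => h (hc.mpr hh))]

theorem foldl_stepB (v : List Int) : ∀ (u : List Int) (c : Int),
    List.foldl stepB (u, c) v = ((runB v u.reverse c).1.reverse, (runB v u.reverse c).2) := by
  induction v with
  | nil => intro u c; simp [runB]
  | cons x v ih =>
    intro u c
    rw [List.foldl_cons, stepB_eq]
    by_cases h : (x :: u.reverse).take 4 = [1, 3, 2, 1]
    · rw [if_pos h, ih, runB_cons, if_pos h, List.reverse_reverse]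
    · rw [if_neg h, ih, runB_cons, if_neg h, List.reverse_append, List.reverse_singleton,
        List.singleton_append]

def Occ (xs : List Int) (p : Nat) : Prop :=
  xs[p]? = some 1 ∧ xs[p + 1]? = some 2 ∧ xs[p + 2]? = some 3 ∧ xs[p + 3]? = some 1

theorem rev_take_getElem? (xs : List Int) (m k : Nat) (hk : k < m) (hm : m ≤ xs.length) :
    ((xs.take m).reverse)[k]? = xs[m - 1 - k]? := by
  have hlen : (xs.take m).length = m := by rw [List.length_take]; omega
  rw [List.getElem?_reverse (by rw [hlen]; exact hk), hlen, List.getElem?_take, if_pos (by omega)]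

theorem pop_iff_occ (xs : List Int) (m : Nat) (x : Int) (hx : xs[m]? = some x) :
    ((x :: (xs.take m).reverse).take 4 = [1, 3, 2, 1]) ↔ (3 ≤ m ∧ Occ xs (m - 3)) := by
  have hm' : m < xs.length := by
    rcases List.getElem?_eq_some_iff.mp hx with ⟨h, _⟩; exact h
  rw [take4_eq]
  simp only [List.getElem?_cons_zero, List.getElem?_cons_succ]
  constructor
  · rintro ⟨h1, h2, h3, h4⟩
    have hx1 : x = 1 := by simpa using h1
    have hm3 : 3 ≤ m := by
      by_contra hc
      rw [List.getElem?_eq_none (by simp [List.length_take]; omega)] at h4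
      simp at h4
    rw [rev_take_getElem? xs m 0 (by omega) hm'.le] at h2
    rw [rev_take_getElem? xs m 1 (by omega) hm'.le] at h3
    rw [rev_take_getElem? xs m 2 (by omega) hm'.le] at h4
    refine ⟨hm3, ?_, ?_, ?_, ?_⟩
    · rw [show m - 3 = m - 1 - 2 by omega]; exact h4
    · rw [show m - 3 + 1 = m - 1 - 1 by omega]; exact h3
    · rw [show m - 3 + 2 = m - 1 - 0 by omega]; exact h2
    · rw [show m - 3 + 3 = m by omega, hx, hx1]
  · rintro ⟨hm3, o1, o2, o3, o4⟩
    rw [show m - 3 + 3 = m by omega, hx] at o4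
    have hx1 : x = 1 := by simpa using o4
    refine ⟨by rw [hx1], ?_, ?_, ?_⟩
    · rw [rev_take_getElem? xs m 0 (by omega) hm'.le, show m - 1 - 0 = m - 3 + 2 by omega]; exact o3
    · rw [rev_take_getElem? xs m 1 (by omega) hm'.le, show m - 1 - 1 = m - 3 + 1 by omega]; exact o2
    · rw [rev_take_getElem? xs m 2 (by omega) hm'.le, show m - 1 - 2 = m - 3 by omega]; exact o1

theorem take_succ_getElem (xs : List Int) (j : Nat) (hj : j < xs.length) :
    xs.take (j + 1) = xs.take j ++ [xs[j]] := by
  rw [List.take_add_one, List.getElem?_eq_getElem hj]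
  rfl

theorem runB_push (xs : List Int) : ∀ (k j : Nat) (w : List Int) (c : Int), j + k ≤ xs.length →
    (∀ t, j ≤ t → t < j + k → ¬ (3 ≤ t ∧ Occ xs (t - 3))) →
    runB ((xs.take (j + k)).drop j ++ w) ((xs.take j).reverse) c
      = runB w ((xs.take (j + k)).reverse) c := by
  intro k
  induction k with
  | zero =>
    intro j w c _ _
    rw [List.drop_eq_nil_of_le (by rw [List.length_take]; omega), List.nil_append, Nat.add_zero]
  | succ k ih =>
    intro j w c hlen hno
    have hjlt : j < xs.length := by omega
    have hjtake : j < (xs.take (j + (k + 1))).length := by rw [List.length_take]; omega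
    have hseg : (xs.take (j + (k + 1))).drop j
        = xs[j] :: (xs.take (j + (k + 1))).drop (j + 1) := by
      rw [List.drop_eq_getElem_cons hjtake, List.getElem_take]
    rw [hseg, List.cons_append]
    show runB (xs[j] :: ((xs.take (j + (k + 1))).drop (j + 1) ++ w)) _ _ = _
    rw [runB]
    rw [if_neg (by
      rw [pop_iff_occ xs j xs[j] (List.getElem?_eq_getElem hjlt)]
      exact hno j le_rfl (by omega))]
    have hstack : xs[j] :: (xs.take j).reverse = (xs.take (j + 1)).reverse := by
      rw [take_succ_getElem xs j hjlt, List.reverse_append, List.reverse_singleton,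
        List.singleton_append]
    rw [hstack]
    have := ih (j + 1) w c (by omega) (fun t ht1 ht2 => hno t (by omega) (by omega))
    rw [show j + 1 + k = j + (k + 1) by omega] at this
    exact this

theorem occ_iff_drop_take (xs : List Int) (m : Nat) :
    Occ xs m ↔ (xs.drop m).take 4 = [1, 2, 3, 1] := by
  rw [take4_eq]
  simp only [List.getElem?_drop]
  unfold Occ
  constructor
  · rintro ⟨a, b, c, d⟩; exact ⟨by simpa using a, by simpa using b, by simpa using c, by simpa using d⟩
  · rintro ⟨a, b, c, d⟩; exact ⟨by simpa using a, by simpa using b, by simpa using c, by simpa using d⟩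

theorem neg_no_match (xs : List Int) (i : Int) (h2 : i < 0) (h1 : -3 ≤ i) :
    PySem.List.slice xs (some i) (some (i + 4)) ≠ [1, 2, 3, 1] := by
  intro h
  have hlen : (PySem.List.slice xs (some i) (some (i + 4))).length = 4 := by rw [h]; rfl
  rw [PySem.List.length_slice] at hlen
  have hk : i + 4 = (((i + 4).toNat : Nat) : Int) := by omega
  have hcl := PySem.List.clampIdx_natCast xs.length (i + 4).toNat
  rw [hk, hcl] at hlen
  omega

theorem solutionAux_eq : ∀ (fuel : Nat) (xs : List Int) (i rst : Int),
    -3 ≤ i → (xs.length : Int) - i < (fuel : Int) → (∀ p : Nat, (p : Int) < i → ¬ Occ xs p) →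
    solutionAux fuel xs i rst = (runB (xs.drop i.toNat) ((xs.take i.toNat).reverse) rst).2 := by
  intro fuel
  induction fuel with
  | zero =>
    intro xs i rst h3 hb hinv
    have hlen : xs.length ≤ i.toNat := by omega
    simp only [solutionAux]
    rw [List.drop_eq_nil_of_le hlen, runB_nil]
  | succ fuel ih =>
    intro xs i rst h3 hb hinv
    simp only [solutionAux]
    by_cases hguard : (xs.length : Int) - 2 ≥ i
    · rw [if_pos hguard]
      by_cases hm : PySem.List.slice xs (some i) (some (i + 4)) = [1, 2, 3, 1]
      · rw [if_pos hm]
        have hi0 : 0 ≤ i := by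
          by_contra hc
          rw [Int.not_le] at hc
          exact neg_no_match xs i hc h3 hm
        set m := i.toNat with hmdef
        have hs : PySem.List.slice xs (some i) (some (i + 4)) = (xs.drop m).take 4 := by
          rw [show i = ((m : Nat) : Int) by omega,
            show ((m : Nat) : Int) + 4 = ((m : Int) + ((4 : Nat) : Int)) by norm_num]
          exact PySem.List.slice_natCast_add xs m 4
        have hocc4 : (xs.drop m).take 4 = [1, 2, 3, 1] := by rw [← hs]; exact hm
        have hlen4 : m + 4 ≤ xs.length := by
          have := congrArg List.length hocc4
          simp at this
          omega
        have hys : PySem.List.slice xs none (some i) ++ PySem.List.slice xs (some (i + 4)) none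
            = xs.take m ++ xs.drop (m + 4) := by
          rw [show i = ((m : Nat) : Int) by omega, PySem.List.slice_to_natCast,
            show ((m : Nat) : Int) + 4 = (((m + 4 : Nat)) : Int) by push_cast; ring,
            PySem.List.slice_from_natCast]
        rw [hys]
        set ys := xs.take m ++ xs.drop (m + 4) with hysdef
        have hyse : ∀ k : Nat, ys[k]? = if k < m then xs[k]? else xs[k + 4]? := by
          intro k
          by_cases hk : k < m
          · rw [hysdef, List.getElem?_append_left (by rw [List.length_take]; omega),
              List.getElem?_take, if_pos hk, if_pos hk]
          · rw [hysdef, List.getElem?_append_right (by rw [List.length_take]; omega), if_neg hk,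
              List.length_take, List.getElem?_drop]
            congr 1
            omega
        have hinv' : ∀ p : Nat, (p : Int) < i - 3 → ¬ Occ ys p := by
          intro p hp ho
          apply hinv p (by omega)
          obtain ⟨o1, o2, o3, o4⟩ := ho
          rw [hyse, if_pos (by omega)] at o1
          rw [hyse, if_pos (by omega)] at o2
          rw [hyse, if_pos (by omega)] at o3
          rw [hyse, if_pos (by omega)] at o4
          exact ⟨o1, o2, o3, o4⟩
        have hyslen : ys.length = xs.length - 4 := by
          rw [← hys]
          exact (pvDel_length xs i hm).1
        rw [ih ys (i - 3) (rst + 1) (by omega) (by rw [hyslen]; omega) hinv']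
        set j := (i - 3).toNat with hjdef
        have hjm : j ≤ m := by omega
        have hty : ys.take j = xs.take j := by
          rw [hysdef, List.take_append_of_le_length (by rw [List.length_take]; omega),
            List.take_take, Nat.min_eq_left hjm]
        have hdy : ys.drop j = (xs.take m).drop j ++ xs.drop (m + 4) := by
          rw [hysdef, List.drop_append_of_le_length (by rw [List.length_take]; omega)]
        rw [hty, hdy]
        have hpush := runB_push xs (m - j) j (xs.drop (m + 4)) (rst + 1) (by omega)
          (by rintro t ht1 ht2 ⟨h3t, ho⟩; exact hinv (t - 3) (by omega) ho)
        rw [show j + (m - j) = m by omega] at hpush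
        rw [hpush]
        have hdropsplit : xs.drop m = 1 :: 2 :: 3 :: 1 :: xs.drop (m + 4) := by
          conv_lhs => rw [← List.take_append_drop 4 (xs.drop m)]
          rw [hocc4, List.drop_drop, show m + 4 = 4 + m by omega]
          rfl
        have hxm : xs[m]? = some 1 := by
          have h0 := ((take4_eq _ 1 2 3 1).mp hocc4).1
          rw [List.getElem?_drop] at h0
          simpa using h0
        have hC1 : ¬ (((1 : Int) :: (xs.take m).reverse).take 4 = [1, 3, 2, 1]) := by
          rw [pop_iff_occ xs m 1 hxm]
          rintro ⟨h3m, ho⟩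
          exact hinv (m - 3) (by omega) ho
        rw [hdropsplit, runB_cons, if_neg hC1, runB_cons, if_neg (by simp), runB_cons,
          if_neg (by simp), runB_cons, if_pos (by simp)]
        simp
      · rw [if_neg hm]
        by_cases hi0 : i < 0
        · rw [ih xs (i + 1) rst (by omega) (by omega)
            (by intro p hp _; exact absurd hp (by omega))]
          rw [show (i + 1).toNat = i.toNat by omega]
        · rw [Int.not_lt] at hi0
          set m := i.toNat with hmdef
          have hmlt : m < xs.length := by omega
          have hnotocc : ¬ Occ xs m := by
            intro ho
            apply hm
            rw [occ_iff_drop_take] at ho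
            rw [show i = ((m : Nat) : Int) by omega,
              show ((m : Nat) : Int) + 4 = ((m : Int) + ((4 : Nat) : Int)) by norm_num,
              PySem.List.slice_natCast_add, ho]
          have hinv' : ∀ p : Nat, (p : Int) < i + 1 → ¬ Occ xs p := by
            intro p hp
            by_cases hpi : (p : Int) < i
            · exact hinv p hpi
            · rw [show p = m by omega]
              exact hnotocc
          rw [ih xs (i + 1) rst (by omega) (by omega) hinv',
            show (i + 1).toNat = m + 1 by omega]
          conv_rhs => rw [List.drop_eq_getElem_cons hmlt]
          rw [runB_cons, if_neg (by
            rw [pop_iff_occ xs m xs[m] (List.getElem?_eq_getElem hmlt)]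
            rintro ⟨h3m, ho⟩
            exact hinv (m - 3) (by omega) ho)]
          rw [take_succ_getElem xs m hmlt, List.reverse_append, List.reverse_singleton,
            List.singleton_append]

    · rw [if_neg hguard]
      by_cases hlen : xs.length ≤ i.toNat
      · rw [List.drop_eq_nil_of_le hlen, runB_nil]
      · have key := runB_push xs (xs.length - i.toNat) i.toNat [] rst (by omega)
          (by rintro t ht1 ht2 ⟨h3t, ho⟩; exact hinv (t - 3) (by omega) ho)
        rw [show i.toNat + (xs.length - i.toNat) = xs.length by omega, List.take_length,
          List.append_nil] at key
        rw [key, runB_nil]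

-- ===== VERDICT (by name: the statement is the Claim_ definition above) =====
theorem solution_spec : Claim_equal_solution := by
  intro ingredient _
  unfold Spec_solution solution solution_alt
  rw [foldl_stepB, solutionAux_eq (ingredient.length + 1) ingredient 0 0 (by omega) (by push_cast; omega) (by intro p hp; omega)]
  simp
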